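-- pv_equiv track=rewrite | github.com/locate918/capstone | backend/src/scraper/scraperExtractors/venueExtractors.py | _rhp_categories
-- ===== SOURCE A (Python) =====
-- def _rhp_categories(title: str, tagline: str) -> list[str]:
--     cats = ['Live Entertainment']
--     tl = (title + ' ' + tagline).lower()
--     if any(w in tl for w in ['concert', 'tour', 'live', 'music', 'band', 'ballroom']):
--         cats.append('Live Music')
--     if any(w in tl for w in ['comedy', 'standup', 'stand-up']):
--         cats.append('Comedy')
--     if any(w in tl for w in ['baseball', 'basketball', 'sports', 'oru']):
--         cats.append('Sports')
--     if any(w in tl for w in ['family', 'homecoming', 'graduation', 'commencement']):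
--         cats.append('Family Friendly')
--     return cats
-- ===== SOURCE B (Python) =====
-- KEYWORD_CATEGORY = {
--     'concert': 'Live Music', 'tour': 'Live Music', 'live': 'Live Music',
--     'music': 'Live Music', 'band': 'Live Music', 'ballroom': 'Live Music',
--     'comedy': 'Comedy', 'standup': 'Comedy', 'stand-up': 'Comedy',
--     'baseball': 'Sports', 'basketball': 'Sports', 'sports': 'Sports', 'oru': 'Sports',
--     'family': 'Family Friendly', 'homecoming': 'Family Friendly',
--     'graduation': 'Family Friendly', 'commencement': 'Family Friendly',
-- }
-- CATEGORY_ORDER = ['Live Music', 'Comedy', 'Sports', 'Family Friendly']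
--
-- def _rhp_categories(title: str, tagline: str) -> list[str]:
--     tl = (title + ' ' + tagline).lower()
--     found = set()
--     for i in range(len(tl)):
--         for kw, cat in KEYWORD_CATEGORY.items():
--             if tl.startswith(kw, i):
--                 found.add(cat)
--     return ['Live Entertainment'] + [c for c in CATEGORY_ORDER if c in found]
-- ===== Notes on version B (the rewrite author's own statement) =====
-- stated objective: alternative
-- what changed: Instead of running a separate substring search over the text for each of the 17 keywords grouped in four if-branches, B makes a single left-to-right scan over the text positions, matching all keywords as prefixes at each position via a keyword-to-category map and accumulating the matched categories in a set, then emits them in a fixed order.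
import Mathlib
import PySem

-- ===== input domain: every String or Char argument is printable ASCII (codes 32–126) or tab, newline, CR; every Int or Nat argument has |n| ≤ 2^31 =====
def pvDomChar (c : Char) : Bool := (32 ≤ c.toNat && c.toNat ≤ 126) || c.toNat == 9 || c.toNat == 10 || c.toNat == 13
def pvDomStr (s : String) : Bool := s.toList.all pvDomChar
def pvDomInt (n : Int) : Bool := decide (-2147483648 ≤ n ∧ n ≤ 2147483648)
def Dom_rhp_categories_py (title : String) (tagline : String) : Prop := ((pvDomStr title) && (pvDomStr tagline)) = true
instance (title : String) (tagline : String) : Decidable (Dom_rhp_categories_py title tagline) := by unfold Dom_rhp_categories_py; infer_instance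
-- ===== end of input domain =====

-- B replaces A's four per-group substring searches by ONE left-to-right scan over the
-- text positions, matching all keywords as prefixes at each position via a
-- keyword->category map into a set (objective: alternative).

-- ===== PORT A =====
-- 'any(w in tl for w in kws)' on the List Char side (exact for '+', '.lower()', 'in')
def rhpMatch (tl : List Char) (kws : List String) : Bool :=
  kws.any (fun w => PySem.Chars.isIn w.toList tl)

def rhp_categories_py (title : String) (tagline : String) : List String :=
  let cats := ["Live Entertainment"]
  let tl := PySem.Chars.lower (title.toList ++ [' '] ++ tagline.toList)
  let cats := if rhpMatch tl ["concert", "tour", "live", "music", "band", "ballroom"]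
              then cats ++ ["Live Music"] else cats
  let cats := if rhpMatch tl ["comedy", "standup", "stand-up"]
              then cats ++ ["Comedy"] else cats
  let cats := if rhpMatch tl ["baseball", "basketball", "sports", "oru"]
              then cats ++ ["Sports"] else cats
  let cats := if rhpMatch tl ["family", "homecoming", "graduation", "commencement"]
              then cats ++ ["Family Friendly"] else cats
  cats

-- ===== PORT B =====
-- KEYWORD_CATEGORY.items() in insertion order
def rhpKw : List (String × String) :=
  [("concert", "Live Music"), ("tour", "Live Music"), ("live", "Live Music"),
   ("music", "Live Music"), ("band", "Live Music"), ("ballroom", "Live Music"),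
   ("comedy", "Comedy"), ("standup", "Comedy"), ("stand-up", "Comedy"),
   ("baseball", "Sports"), ("basketball", "Sports"), ("sports", "Sports"), ("oru", "Sports"),
   ("family", "Family Friendly"), ("homecoming", "Family Friendly"),
   ("graduation", "Family Friendly"), ("commencement", "Family Friendly")]

def rhpOrder : List String := ["Live Music", "Comedy", "Sports", "Family Friendly"]

-- tl.startswith(kw, i) is 'kw is a prefix of tl from position i' (exact for 0 ≤ i ≤ len)
def rhp_categories_py_alt (title : String) (tagline : String) : List String :=
  let tl := PySem.Chars.lower (title.toList ++ [' '] ++ tagline.toList)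
  let found : PySem.Set String :=
    (List.range tl.length).foldl
      (fun s i =>
        rhpKw.foldl
          (fun s kc => if PySem.Chars.startswith (tl.drop i) kc.1.toList
                       then PySem.Set.add s kc.2 else s) s)
      PySem.Set.empty
  ["Live Entertainment"] ++ rhpOrder.filter (fun c => PySem.Set.contains found c)

-- ===== PRECONDITION & SPEC =====
def Spec_rhp_categories_py (title : String) (tagline : String) (out : List String) : Prop := out = rhp_categories_py_alt title tagline
instance (title : String) (tagline : String) (out : List String) : Decidable (Spec_rhp_categories_py title tagline out) := by unfold Spec_rhp_categories_py; infer_instance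

-- ===== CLAIM =====
def Claim_equal_rhp_categories_py : Prop := ∀ (title : String) (tagline : String), Dom_rhp_categories_py title tagline → Spec_rhp_categories_py title tagline (rhp_categories_py title tagline)

-- ===== LEMMAS AND PROOFS =====

-- membership after a fold that conditionally adds one element per item
theorem mem_foldl_condAdd {α : Type} (l : List α) (p : α → Bool) (cat : α → String)
    (s : List String) (c : String) :
    (c ∈ l.foldl (fun s x => if p x then PySem.Set.add s (cat x) else s) s) ↔
      c ∈ s ∨ ∃ x ∈ l, p x = true ∧ cat x = c := by
  induction l generalizing s with
  | nil => simp
  | cons y l ih =>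
      simp only [List.foldl_cons, ih]
      by_cases hy : p y = true
      · simp only [hy, if_true, PySem.Set.mem_add, List.mem_cons]
        aesop
      · simp only [hy, List.mem_cons]
        aesop

-- membership after folding a step whose membership is characterised by Q
theorem mem_foldl_of_step {β : Type} (l : List β) (F : List String → β → List String)
    (Q : β → String → Prop)
    (h : ∀ s i c, c ∈ F s i ↔ c ∈ s ∨ Q i c) (s : List String) (c : String) :
    (c ∈ l.foldl F s) ↔ c ∈ s ∨ ∃ i ∈ l, Q i c := by
  induction l generalizing s with
  | nil => simp
  | cons y l ih =>
      simp only [List.foldl_cons, ih, h, List.mem_cons]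
      aesop

-- B's found-set membership for a category c: some keyword mapped to c occurs in tl
theorem mem_found_iff (tl : List Char) (c : String) :
    (c ∈ (List.range tl.length).foldl
      (fun s i =>
        rhpKw.foldl
          (fun s kc => if PySem.Chars.startswith (tl.drop i) kc.1.toList
                       then PySem.Set.add s kc.2 else s) s)
      PySem.Set.empty) ↔
      ∃ kc ∈ rhpKw, PySem.Chars.isIn kc.1.toList tl = true ∧ kc.2 = c := by
  rw [mem_foldl_of_step (List.range tl.length) _
        (fun i c => ∃ kc ∈ rhpKw,
          PySem.Chars.startswith (tl.drop i) kc.1.toList = true ∧ kc.2 = c)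
        (fun s i c => mem_foldl_condAdd rhpKw _ _ s c)]
  simp only [PySem.Set.empty, List.not_mem_nil, false_or, List.mem_range]
  constructor
  · rintro ⟨i, _, kc, hkc, hsw, hc⟩
    refine ⟨kc, hkc, ?_, hc⟩
    rw [← PySem.Chars.exists_prefix_drop_iff_isIn]
    exact ⟨i, (PySem.Chars.startswith_iff _ _).1 hsw⟩
  · rintro ⟨kc, hkc, hin, hc⟩
    obtain ⟨i, hpre⟩ := (PySem.Chars.exists_prefix_drop_iff_isIn _ _).2 hin
    have hne : kc.1.toList ≠ [] := by
      fin_cases hkc <;> simp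
    have hilt : i < tl.length := by
      rcases Nat.lt_or_ge i tl.length with h | h
      · exact h
      · exact absurd (by rwa [List.drop_eq_nil_of_le h, List.prefix_nil] at hpre) hne
    exact ⟨i, hilt, kc, hkc, (PySem.Chars.startswith_iff _ _).2 hpre, hc⟩

-- each category's found-flag equals A's group test
theorem contains_found_eq (tl : List Char) (c : String) (kws : List String)
    (hgroup : ∀ kc ∈ rhpKw, kc.2 = c ↔ kc.1 ∈ kws)
    (hsub : ∀ w ∈ kws, ∃ kc ∈ rhpKw, kc.1 = w ∧ kc.2 = c) :
    PySem.Set.contains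
      ((List.range tl.length).foldl
        (fun s i =>
          rhpKw.foldl
            (fun s kc => if PySem.Chars.startswith (tl.drop i) kc.1.toList
                         then PySem.Set.add s kc.2 else s) s)
        PySem.Set.empty) c = rhpMatch tl kws := by
  rw [Bool.eq_iff_iff]
  have hcont : ∀ (F : List String),
      (PySem.Set.contains F c = true) ↔ c ∈ F := by
    intro F; simp [PySem.Set.contains]
  rw [hcont, mem_found_iff]
  simp only [rhpMatch, List.any_eq_true]
  constructor
  · rintro ⟨kc, hkc, hin, hc⟩
    exact ⟨kc.1, (hgroup kc hkc).1 hc, hin⟩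
  · rintro ⟨w, hw, hin⟩
    obtain ⟨kc, hkc, hw1, hw2⟩ := hsub w hw
    exact ⟨kc, hkc, by rw [hw1]; exact hin, hw2⟩

-- A's if/append chain equals the ordered-filter form, for any match predicate p
theorem rhp_unroll_eq_filter (p : List String → Bool) :
    (let cats := ["Live Entertainment"]
     let cats := if p ["concert", "tour", "live", "music", "band", "ballroom"]
                 then cats ++ ["Live Music"] else cats
     let cats := if p ["comedy", "standup", "stand-up"]
                 then cats ++ ["Comedy"] else cats
     let cats := if p ["baseball", "basketball", "sports", "oru"]
                 then cats ++ ["Sports"] else cats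
     let cats := if p ["family", "homecoming", "graduation", "commencement"]
                 then cats ++ ["Family Friendly"] else cats
     cats)
    = ["Live Entertainment"] ++
      (["Live Music", "Comedy", "Sports", "Family Friendly"].filter (fun c =>
        if c = "Live Music" then p ["concert", "tour", "live", "music", "band", "ballroom"]
        else if c = "Comedy" then p ["comedy", "standup", "stand-up"]
        else if c = "Sports" then p ["baseball", "basketball", "sports", "oru"]
        else p ["family", "homecoming", "graduation", "commencement"])) := by
  cases h1 : p ["concert", "tour", "live", "music", "band", "ballroom"] <;>
  cases h2 : p ["comedy", "standup", "stand-up"] <;>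
  cases h3 : p ["baseball", "basketball", "sports", "oru"] <;>
  cases h4 : p ["family", "homecoming", "graduation", "commencement"] <;>
    simp_all [List.filter]

-- ===== VERDICT =====
theorem rhp_categories_py_spec : Claim_equal_rhp_categories_py := by
  intro title tagline _
  unfold Spec_rhp_categories_py rhp_categories_py rhp_categories_py_alt
  set tl := PySem.Chars.lower (title.toList ++ [' '] ++ tagline.toList) with htl
  rw [rhp_unroll_eq_filter (rhpMatch tl)]
  congr 1
  unfold rhpOrder
  apply List.filter_congr
  intro c hc
  have h1 := contains_found_eq tl "Live Music"
      ["concert", "tour", "live", "music", "band", "ballroom"]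
      (by intro kc hkc; fin_cases hkc <;> simp) (by intro w hw; fin_cases hw <;> simp [rhpKw])
  have h2 := contains_found_eq tl "Comedy" ["comedy", "standup", "stand-up"]
      (by intro kc hkc; fin_cases hkc <;> simp) (by intro w hw; fin_cases hw <;> simp [rhpKw])
  have h3 := contains_found_eq tl "Sports" ["baseball", "basketball", "sports", "oru"]
      (by intro kc hkc; fin_cases hkc <;> simp) (by intro w hw; fin_cases hw <;> simp [rhpKw])
  have h4 := contains_found_eq tl "Family Friendly"
      ["family", "homecoming", "graduation", "commencement"]
      (by intro kc hkc; fin_cases hkc <;> simp) (by intro w hw; fin_cases hw <;> simp [rhpKw])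
  fin_cases hc
  · simpa using h1.symm
  · simpa using h2.symm
  · simpa using h3.symm
  · simpa using h4.symm
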